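-- pv_equiv track=rewrite | github.com/IspML/Euclidean-tsp-playground | disjoiner.py | independent_move
-- ===== SOURCE A (Python) =====
-- def independent_move(move):
--     frequencies = {}
--     for edge in move[0]:
--         for point in edge:
--             if point not in frequencies:
--                 frequencies[point] = 0
--             frequencies[point] += 1
--             if frequencies[point] > 1:
--                 return False
--     return True
-- ===== SOURCE B (Python) =====
-- def independent_move(move):
--     points = sorted(p for edge in move[0] for p in edge)
--     for a, b in zip(points, points[1:]):
--         if a == b:
--             return False
--     return True
-- ===== Notes on version B (the rewrite author's own statement) =====
-- stated objective: alternative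
-- what changed: A's frequency-dict scan with early return is replaced by sort-then-adjacent-scan: flatten the endpoints, sort them, and report a duplicate iff two neighbouring sorted values are equal (correct because in a sorted list any duplicates are adjacent).
import Mathlib
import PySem

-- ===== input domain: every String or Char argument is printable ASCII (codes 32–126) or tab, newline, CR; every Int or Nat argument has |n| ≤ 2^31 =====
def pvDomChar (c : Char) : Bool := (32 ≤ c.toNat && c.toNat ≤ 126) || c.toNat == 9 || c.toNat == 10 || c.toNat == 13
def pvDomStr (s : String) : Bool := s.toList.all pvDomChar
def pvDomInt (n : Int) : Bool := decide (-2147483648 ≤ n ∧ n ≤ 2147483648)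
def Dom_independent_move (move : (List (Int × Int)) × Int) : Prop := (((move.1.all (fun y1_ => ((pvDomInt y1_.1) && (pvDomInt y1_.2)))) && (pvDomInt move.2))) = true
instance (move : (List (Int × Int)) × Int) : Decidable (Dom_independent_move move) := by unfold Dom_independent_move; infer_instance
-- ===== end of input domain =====

-- B replaces A's frequency-dict scan (early return on a repeated point) with sort-then-adjacent-scan (alternative algorithm).

-- ===== PORT A =====
-- one inner-loop body of A: setdefault-to-0, increment, early return False if count > 1
def pvPointA (d : PySem.Dict Int Int) (p : Int) : Option (PySem.Dict Int Int) :=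
  let d1 := if d.contains p then d else d.insert p 0
  let d2 := d1.insert p (d1.getD p 0 + 1)
  if d2.getD p 0 > 1 then none else some d2

-- the nested 'for edge … for point in edge' loop with early return
def pvEdgesA : List (Int × Int) → PySem.Dict Int Int → Bool
  | [], _ => true
  | e :: es, d =>
    match pvPointA d e.1 with
    | none => false
    | some d1 =>
      match pvPointA d1 e.2 with
      | none => false
      | some d2 => pvEdgesA es d2

def independent_move (move : (List (Int × Int)) × Int) : Bool :=
  pvEdgesA move.1 PySem.Dict.empty

-- ===== PORT B =====
-- 'for a, b in zip(points, points[1:]): if a == b: return False' — the adjacent-pair scan, step for step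
def pvAdjScan : List Int → Bool
  | a :: b :: rest => if a == b then false else pvAdjScan (b :: rest)
  | _ => true

def independent_move_alt (move : (List (Int × Int)) × Int) : Bool :=
  let points := PySem.List.sorted (move.1.flatMap (fun edge => [edge.1, edge.2])) (fun x => x) false
  pvAdjScan points

-- ===== PRECONDITION & SPEC =====
def Spec_independent_move (move : (List (Int × Int)) × Int) (out : Bool) : Prop := out = independent_move_alt move
instance (move : (List (Int × Int)) × Int) (out : Bool) : Decidable (Spec_independent_move move out) := by unfold Spec_independent_move; infer_instance

-- ===== CLAIM (what is proved, stated in full; the proofs are below) =====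
def Claim_equal_independent_move : Prop := ∀ (move : (List (Int × Int)) × Int), Dom_independent_move move → Spec_independent_move move (independent_move move)

-- ===== LEMMAS AND PROOFS =====

-- A's loop rephrased over the flattened point list (same computation, one point at a time)
def pvPointsA : List Int → PySem.Dict Int Int → Bool
  | [], _ => true
  | p :: ps, d =>
    match pvPointA d p with
    | none => false
    | some d' => pvPointsA ps d'

theorem pvEdgesA_eq_points (es : List (Int × Int)) (d : PySem.Dict Int Int) :
    pvEdgesA es d = pvPointsA (es.flatMap (fun e => [e.1, e.2])) d := by
  induction es generalizing d with
  | nil => rfl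
  | cons e es ih =>
    simp only [List.flatMap_cons, List.cons_append, List.nil_append, pvEdgesA, pvPointsA]
    cases pvPointA d e.1 with
    | none => rfl
    | some d1 =>
      dsimp only
      cases pvPointA d1 e.2 with
      | none => rfl
      | some d2 => exact ih d2

theorem pvPointA_contains (d : PySem.Dict Int Int) (p : Int)
    (hInv : ∀ q, d.contains q = true → d.getD q 0 = 1) (hc : d.contains p = true) :
    pvPointA d p = none := by
  simp only [pvPointA, hc, if_true]
  have h1 : d.getD p 0 = 1 := hInv p hc
  simp [h1]

theorem pvPointA_not_contains (d : PySem.Dict Int Int) (p : Int)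
    (hc : d.contains p = false) :
    pvPointA d p = some ((d.insert p 0).insert p 1) := by
  simp [pvPointA, hc]

theorem pvPointsA_spec (ps : List Int) : ∀ (d : PySem.Dict Int Int),
    (∀ q, d.contains q = true → d.getD q 0 = 1) →
    (pvPointsA ps d = true ↔ ps.Nodup ∧ ∀ p ∈ ps, d.contains p = false) := by
  induction ps with
  | nil => intro d _; simp [pvPointsA]
  | cons p ps ih =>
    intro d hInv
    by_cases hc : d.contains p = true
    · rw [pvPointsA, pvPointA_contains d p hInv hc]
      simp only [Bool.false_eq_true, false_iff, not_and]
      intro _ h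
      have := h p (List.mem_cons_self ..)
      rw [hc] at this
      exact absurd this (by simp)
    · have hc' : d.contains p = false := by simpa using hc
      rw [pvPointsA, pvPointA_not_contains d p hc']
      set d2 := (d.insert p 0).insert p 1 with hd2
      have hcont : ∀ q, d2.contains q = ((q == p) || d.contains q) := by
        intro q
        simp [hd2, PySem.Dict.contains_insert]
      have hInv2 : ∀ q, d2.contains q = true → d2.getD q 0 = 1 := by
        intro q hq
        by_cases hqp : q = p
        · simp [hd2, hqp]
        · rw [hcont q] at hq
          simp [hqp] at hq
          simp [hd2, PySem.Dict.getD_insert, hqp]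
          exact hInv q hq
      rw [ih d2 hInv2]
      constructor
      · rintro ⟨hnd, hall⟩
        have hnp : p ∉ ps := by
          intro hmem
          have := hall p hmem
          rw [hcont p] at this
          simp at this
        refine ⟨List.nodup_cons.mpr ⟨hnp, hnd⟩, ?_⟩
        intro q hq
        rcases List.mem_cons.mp hq with h | h
        · exact h ▸ hc'
        · have := hall q h
          rw [hcont q] at this
          simp at this
          simpa using this.2
      · rintro ⟨hnd, hall⟩
        obtain ⟨hnp, hnd'⟩ := List.nodup_cons.mp hnd
        refine ⟨hnd', ?_⟩
        intro q hq
        rw [hcont q]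
        have hqp : q ≠ p := fun h => hnp (h ▸ hq)
        simp [hqp]
        have := hall q (List.mem_cons_of_mem _ hq)
        simpa using this

theorem empty_contains (q : Int) : (PySem.Dict.empty : PySem.Dict Int Int).contains q = false := by
  rfl

-- the adjacent scan is the IsChain (· ≠ ·) predicate
theorem pvAdjScan_iff_chain (xs : List Int) :
    pvAdjScan xs = true ↔ xs.IsChain (· ≠ ·) := by
  induction xs with
  | nil => simp [pvAdjScan]
  | cons a t ih =>
    cases t with
    | nil => simp [pvAdjScan]
    | cons b r =>
      rw [pvAdjScan, List.isChain_cons_cons]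
      by_cases hab : a = b
      · simp [hab]
      · rw [if_neg (by simpa using hab), ih]
        simp [hab]

theorem chain_lt_of_le_ne (xs : List Int)
    (h1 : xs.IsChain (· ≤ ·)) (h2 : xs.IsChain (· ≠ ·)) : xs.IsChain (· < ·) := by
  induction xs with
  | nil => exact .nil
  | cons a t ih =>
    cases t with
    | nil => exact .singleton _
    | cons b r =>
      rw [List.isChain_cons_cons] at h1 h2 ⊢
      exact ⟨lt_of_le_of_ne h1.1 h2.1, ih h1.2 h2.2⟩

theorem isChain_of_pairwise (xs : List Int)
    (h : xs.Pairwise (· ≠ ·)) : xs.IsChain (· ≠ ·) := by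
  induction xs with
  | nil => exact .nil
  | cons a t ih =>
    cases t with
    | nil => exact .singleton _
    | cons b r =>
      rw [List.isChain_cons_cons]
      rw [List.pairwise_cons] at h
      exact ⟨h.1 b (List.mem_cons_self ..), ih h.2⟩

-- on a ≤-sorted list, adjacent-distinct is exactly Nodup
theorem adjscan_sorted_iff_nodup (xs : List Int)
    (hs : xs.Pairwise (· ≤ ·)) : pvAdjScan xs = true ↔ xs.Nodup := by
  rw [pvAdjScan_iff_chain]
  constructor
  · intro h
    have hle : xs.IsChain (· ≤ ·) := List.isChain_iff_pairwise.mpr hs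
    have hlt : xs.IsChain (· < ·) := chain_lt_of_le_ne xs hle h
    have hp : xs.Pairwise (· < ·) := List.isChain_iff_pairwise.mp hlt
    exact hp.imp (fun h => ne_of_lt h)
  · intro h
    exact isChain_of_pairwise _ (h.imp (fun h => h))

-- ===== VERDICT (by name: the statement is the Claim_ definition above) =====
theorem independent_move_spec : Claim_equal_independent_move := by
  intro move _
  unfold Spec_independent_move independent_move independent_move_alt
  rw [pvEdgesA_eq_points]
  set pts := move.1.flatMap (fun e => [e.1, e.2]) with hpts
  rw [Bool.eq_iff_iff]
  rw [pvPointsA_spec pts PySem.Dict.empty (by intro q hq; rw [empty_contains] at hq; cases hq)]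
  have hpw : (PySem.List.sorted pts (fun x => x) false).Pairwise (· ≤ ·) := by
    have := PySem.List.sorted_pairwise (xs := pts) (key := fun x => x)
    simpa using this
  rw [adjscan_sorted_iff_nodup _ hpw]
  rw [(PySem.List.sorted_perm pts (fun x => x) false).nodup_iff]
  constructor
  · rintro ⟨hnd, _⟩; exact hnd
  · intro h; exact ⟨h, fun p _ => empty_contains p⟩
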